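-- pv_equiv track=rewrite | github.com/SHA1-un/URL-Spider | filter.py | top_5
-- ===== SOURCE A (Python) =====
-- def top_5(content):
--     count = 0
--     new_content = []
--
--     for line in content:
--         if (line != ''):
--             if (line[0] == '#'):
--                 count = 0
--                 new_content.append(line)
--             else:
--                 if (count <= 5):
--                     new_content.append(line)
--             count += 1
--
--     return new_content
-- ===== SOURCE B (Python) =====
-- def top_5(content):
--     lines = [l for l in content if l != '']
--     sections = []
--     cur = []
--     for l in lines:
--         if l[0] == '#':
--             sections.append(cur)
--             cur = [l]
--         else:
--             cur.append(l)
--     sections.append(cur)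
--     return [x for sec in sections for x in sec[:6]]
-- ===== Notes on version B (the rewrite author's own statement) =====
-- stated objective: alternative
-- what changed: B first drops empty lines, then splits the rest into sections at '#' headers and concatenates the first 6 lines of every section (header + 5, or 6 before the first header), instead of A's single pass with a reset counter.
import Mathlib
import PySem

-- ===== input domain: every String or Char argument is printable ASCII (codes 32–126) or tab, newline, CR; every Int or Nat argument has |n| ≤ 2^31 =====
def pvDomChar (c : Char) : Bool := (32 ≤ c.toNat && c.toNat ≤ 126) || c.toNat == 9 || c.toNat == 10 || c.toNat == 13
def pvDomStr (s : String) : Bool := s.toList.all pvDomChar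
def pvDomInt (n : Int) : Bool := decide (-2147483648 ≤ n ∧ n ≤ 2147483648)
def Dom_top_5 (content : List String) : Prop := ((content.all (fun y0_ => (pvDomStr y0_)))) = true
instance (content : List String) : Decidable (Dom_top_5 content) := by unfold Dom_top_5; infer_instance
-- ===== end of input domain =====

-- B splits the non-empty lines into sections at '#' headers and keeps the first 6 lines of every section,
-- instead of A's single pass with a reset counter (objective: alternative decomposition, same cost).

-- ===== PORT A =====
def top_5 (content : List String) : List String :=
  (content.foldl
    (fun (st : Int × List String) line =>
      if line ≠ "" then
        if PySem.Str.pyGet? line 0 = some '#' then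
          -- count = 0; append(line); count += 1
          (1, st.2 ++ [line])
        else
          (st.1 + 1, if st.1 ≤ 5 then st.2 ++ [line] else st.2)
      else st)
    (0, [])).2

-- ===== PORT B =====
def top_5_alt (content : List String) : List String :=
  let lines := content.filter (fun l => l ≠ "")
  let st := lines.foldl
    (fun (st : List (List String) × List String) l =>
      if PySem.Str.pyGet? l 0 = some '#' then (st.1 ++ [st.2], [l])
      else (st.1, st.2 ++ [l]))
    ([], [])
  (st.1 ++ [st.2]).flatMap (fun sec => sec.take 6)

-- ===== PRECONDITION & SPEC =====
def Spec_top_5 (content : List String) (out : List String) : Prop := out = top_5_alt content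
instance (content : List String) (out : List String) : Decidable (Spec_top_5 content out) := by unfold Spec_top_5; infer_instance

-- ===== CLAIM (what is proved, stated in full; the proofs are below) =====
def Claim_equal_top_5 : Prop := ∀ (content : List String), Dom_top_5 content → Spec_top_5 content (top_5 content)

-- ===== LEMMAS AND PROOFS =====

-- the two loop bodies, on the already-filtered lines
def pvA (st : Int × List String) (l : String) : Int × List String :=
  if PySem.Str.pyGet? l 0 = some '#' then (1, st.2 ++ [l])
  else (st.1 + 1, if st.1 ≤ 5 then st.2 ++ [l] else st.2)

def pvB (st : List (List String) × List String) (l : String) : List (List String) × List String :=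
  if PySem.Str.pyGet? l 0 = some '#' then (st.1 ++ [st.2], [l])
  else (st.1, st.2 ++ [l])

-- loop invariant: A's count is the length of B's current section, and A's accumulator is
-- the finished sections' first-6 pieces followed by the first 6 of the current section
theorem pv_loop (ls : List String) : ∀ (secs : List (List String)) (cur : List String),
    List.foldl pvA ((cur.length : Int), secs.flatMap (fun sec => sec.take 6) ++ cur.take 6) ls
    = (((List.foldl pvB (secs, cur) ls).2.length : Int),
       (List.foldl pvB (secs, cur) ls).1.flatMap (fun sec => sec.take 6)
         ++ (List.foldl pvB (secs, cur) ls).2.take 6) := by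
  induction ls with
  | nil => intro secs cur; simp
  | cons l ls ih =>
    intro secs cur
    by_cases h : PySem.List.pyGet? l.toList 0 = some '#'
    · have e1 : pvA ((cur.length : Int), secs.flatMap (fun sec => sec.take 6) ++ cur.take 6) l
          = ((([l] : List String).length : Int),
             (secs ++ [cur]).flatMap (fun sec => sec.take 6) ++ ([l] : List String).take 6) := by
        simp [pvA, h]
      have e2 : pvB (secs, cur) l = (secs ++ [cur], [l]) := by simp [pvB, h]
      simp only [List.foldl_cons, e1, e2]
      exact ih (secs ++ [cur]) [l]
    · have htake : (cur ++ [l]).take 6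
          = cur.take 6 ++ (if (cur.length : Int) ≤ 5 then [l] else []) := by
        rw [List.take_append]
        by_cases hc : cur.length ≤ 5
        · have h1 : List.take (6 - cur.length) [l] = [l] :=
            List.take_of_length_le (by simp; omega)
          rw [h1]
          simp [show ((cur.length : Int) ≤ 5) from by exact_mod_cast hc]
        · rw [Nat.sub_eq_zero_of_le (by omega)]
          simp [show ¬ ((cur.length : Int) ≤ 5) from by exact_mod_cast hc]
      have e1 : pvA ((cur.length : Int), secs.flatMap (fun sec => sec.take 6) ++ cur.take 6) l
          = (((cur ++ [l]).length : Int),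
             secs.flatMap (fun sec => sec.take 6) ++ (cur ++ [l]).take 6) := by
        by_cases hc : cur.length ≤ 5
        · have hc' : ((cur.length : Int) ≤ 5) := by exact_mod_cast hc
          simp [pvA, h, htake, hc']
        · have hc' : ¬ ((cur.length : Int) ≤ 5) := by exact_mod_cast hc
          simp [pvA, h, htake, hc']
      have e2 : pvB (secs, cur) l = (secs, cur ++ [l]) := by simp [pvB, h]
      simp only [List.foldl_cons, e1, e2]
      exact ih secs (cur ++ [l])

-- A's guarded fold over content equals the unguarded fold over the filtered lines
theorem pv_guard (content : List String) :
    content.foldl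
      (fun (st : Int × List String) line =>
        if line ≠ "" then
          if PySem.Str.pyGet? line 0 = some '#' then (1, st.2 ++ [line])
          else (st.1 + 1, if st.1 ≤ 5 then st.2 ++ [line] else st.2)
        else st) (0, [])
    = (content.filter (fun l => l ≠ "")).foldl pvA (0, []) := by
  rw [List.foldl_filter]
  congr 1
  funext st line
  by_cases hl : line = "" <;> simp [hl, pvA]

-- ===== VERDICT (by name: the statement is the Claim_ definition above) =====
theorem top_5_spec : Claim_equal_top_5 := by
  intro content _
  unfold Spec_top_5 top_5 top_5_alt
  rw [pv_guard]
  have hfun : (fun (st : List (List String) × List String) l =>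
      if PySem.Str.pyGet? l 0 = some '#' then (st.1 ++ [st.2], [l]) else (st.1, st.2 ++ [l]))
      = pvB := by
    funext st l; simp [pvB]
  simp only [hfun]
  have h := pv_loop (content.filter (fun l => l ≠ "")) [] []
  simp only [List.length_nil, Nat.cast_zero, List.flatMap_nil, List.take_nil,
    List.append_nil] at h
  rw [h]
  simp
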